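-- pv_equiv track=rewrite | github.com/Xirider/BookGen | pipeline/summarize.py | join_summaries
-- ===== SOURCE A (Python) =====
-- def join_summaries(texts, sum_ratio, join_character= " "):
--     joined = []
--     unjoined = []
--     relations = []
--     for textid, text in enumerate(texts):
--         step = textid % sum_ratio
--
--         if step == 0:
--             joined_text = ""
--             unjoined_text = []
--             relation = []
--
--         joined_text = join_character.join([joined_text, text])
--         relation.append(textid)
--         unjoined_text.append(text)
--
--         if (step == sum_ratio -1) or (textid == len(texts) -1):
--             joined.append(joined_text)
--             unjoined.append(unjoined_text)
--             relations.append(relation)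
--
--     return joined,unjoined, relations
-- ===== SOURCE B (Python) =====
-- def join_summaries(texts, sum_ratio, join_character=" "):
--     joined = []
--     unjoined = []
--     relations = []
--     if not texts:
--         return joined, unjoined, relations
--     for i in range(0, len(texts), sum_ratio):
--         chunk = texts[i:i + sum_ratio]
--         joined.append(join_character + join_character.join(chunk))
--         unjoined.append(list(chunk))
--         relations.append(list(range(i, i + len(chunk))))
--     return joined, unjoined, relations
-- ===== Notes on version B (the rewrite author's own statement) =====
-- stated objective: simpler
-- what changed: Replaces A's per-element modular state machine (step = textid % sum_ratio, reset-on-zero, flush-on-boundary, incremental string concatenation) with one slice per chunk: iterate range(0, len(texts), sum_ratio) and emit the chunk's join, the chunk and its index range directly; this also removes A's repeated re-concatenation of the growing joined_text, which is quadratic in chunk size.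
-- outside the precondition, e.g. on join_summaries(['a', 'b', 'c'], -2, '-'): A returns (['-c'], [['c']], [[2]]), B returns ([], [], [])
import Mathlib
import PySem

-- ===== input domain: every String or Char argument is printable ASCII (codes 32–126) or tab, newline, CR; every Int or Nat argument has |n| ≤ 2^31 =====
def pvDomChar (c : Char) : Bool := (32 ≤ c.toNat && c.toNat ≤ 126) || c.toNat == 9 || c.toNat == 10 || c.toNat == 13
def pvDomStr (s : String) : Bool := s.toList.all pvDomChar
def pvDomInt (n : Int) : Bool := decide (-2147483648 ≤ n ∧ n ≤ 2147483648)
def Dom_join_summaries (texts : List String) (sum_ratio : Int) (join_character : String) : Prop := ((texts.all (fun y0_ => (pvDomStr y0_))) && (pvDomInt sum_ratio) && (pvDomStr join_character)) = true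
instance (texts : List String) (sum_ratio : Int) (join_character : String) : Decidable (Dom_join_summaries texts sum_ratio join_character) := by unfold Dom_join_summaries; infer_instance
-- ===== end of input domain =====

-- B replaces A's per-element modular state machine (step = textid % sum_ratio, reset-on-zero,
-- flush-on-boundary, incremental join) with one direct slice per chunk (simpler decomposition);
-- equivalence is proved on Pre_ (sum_ratio ≥ 1, or empty texts).

-- ===== PORT A =====
-- loop body of A's 'for textid, text in enumerate(texts)':
-- state = ((joined, unjoined, relations), (joined_text, unjoined_text, relation))
def pvAstep (n sum_ratio : Int) (jc : String)
    (st : (List String × List (List String) × List (List Int)) × (String × List String × List Int))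
    (p : Int × String) :
    (List String × List (List String) × List (List Int)) × (String × List String × List Int) :=
  let textid := p.1
  let text := p.2
  let step := PySem.Int.mod textid sum_ratio
  let jt := if step = 0 then "" else st.2.1
  let ut := if step = 0 then ([] : List String) else st.2.2.1
  let rel := if step = 0 then ([] : List Int) else st.2.2.2
  let jt := PySem.Str.join jc [jt, text]
  let rel := rel ++ [textid]
  let ut := ut ++ [text]
  if step = sum_ratio - 1 ∨ textid = n - 1 then
    ((st.1.1 ++ [jt], st.1.2.1 ++ [ut], st.1.2.2 ++ [rel]), (jt, ut, rel))
  else (st.1, (jt, ut, rel))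

def join_summaries (texts : List String) (sum_ratio : Int) (join_character : String) :
    List String × List (List String) × List (List Int) :=
  ((PySem.List.enumerate texts 0).foldl (pvAstep (texts.length : Int) sum_ratio join_character)
    (([], [], []), ("", [], []))).1

-- ===== PORT B =====
-- loop body of B's 'for i in range(0, len(texts), sum_ratio)'
def pvBstep (sum_ratio : Int) (jc : String) (texts : List String)
    (acc : List String × List (List String) × List (List Int)) (i : Int) :
    List String × List (List String) × List (List Int) :=
  let chunk := PySem.List.slice texts (some i) (some (i + sum_ratio))
  (acc.1 ++ [jc ++ PySem.Str.join jc chunk],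
   acc.2.1 ++ [chunk],
   acc.2.2 ++ [PySem.List.pyRange i (i + (chunk.length : Int)) 1])

def join_summaries_alt (texts : List String) (sum_ratio : Int) (join_character : String) :
    List String × List (List String) × List (List Int) :=
  if texts = [] then ([], [], [])
  else (PySem.List.pyRange 0 (texts.length : Int) sum_ratio).foldl
    (pvBstep sum_ratio join_character texts) ([], [], [])

-- ===== PRECONDITION & SPEC =====
-- Pre_ excludes sum_ratio ≤ 0 on nonempty texts: a chunk size ≤ 0 is degenerate — A raises
-- ZeroDivisionError for sum_ratio = 0, and for negative sum_ratio A's modular flush accidentally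
-- returns only the trailing partial chunk while B's range slicing returns empty lists; neither
-- behaviour is specified for this corner.
def Pre_join_summaries (texts : List String) (sum_ratio : Int) (join_character : String) : Prop :=
  1 ≤ sum_ratio ∨ texts = []
instance (texts : List String) (sum_ratio : Int) (join_character : String) : Decidable (Pre_join_summaries texts sum_ratio join_character) := by unfold Pre_join_summaries; infer_instance
def pvWitness_join_summaries : List String × Int × String := (["a", "b", "c"], 2, " ")

def Spec_join_summaries (texts : List String) (sum_ratio : Int) (join_character : String) (out : List String × List (List String) × List (List Int)) : Prop := out = join_summaries_alt texts sum_ratio join_character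
instance (texts : List String) (sum_ratio : Int) (join_character : String) (out : List String × List (List String) × List (List Int)) : Decidable (Spec_join_summaries texts sum_ratio join_character out) := by unfold Spec_join_summaries; infer_instance

-- ===== CLAIM (what is proved, stated in full; the proofs are below) =====
def Claim_equal_join_summaries : Prop := ∀ (texts : List String) (sum_ratio : Int) (join_character : String), Dom_join_summaries texts sum_ratio join_character → Pre_join_summaries texts sum_ratio join_character → Spec_join_summaries texts sum_ratio join_character (join_summaries texts sum_ratio join_character)

-- ===== LEMMAS AND PROOFS =====

lemma pyRange_pos_nil {a b s : Int} (hs : 0 < s) (h : b ≤ a) :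
    PySem.List.pyRange a b s = [] := by
  rw [PySem.List.pyRange_of_pos a b hs, if_neg (by omega)]
  rfl

lemma pyRange_pos_cons {a b s : Int} (hs : 0 < s) (h : a < b) :
    PySem.List.pyRange a b s = a :: PySem.List.pyRange (a + s) b s := by
  rw [PySem.List.pyRange_of_pos a b hs, PySem.List.pyRange_of_pos (a+s) b hs, if_pos h]
  by_cases h2 : a + s < b
  · rw [if_pos h2]
    have e2 : (b - a + s - 1) / s = (b - (a+s) + s - 1) / s + 1 := by
      have e1 : b - a + s - 1 = b - (a + s) + s - 1 + 1 * s := by ring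
      rw [e1, Int.add_mul_ediv_right _ _ (by omega : s ≠ 0)]
    have hpos : 0 ≤ (b - (a+s) + s - 1) / s := Int.ediv_nonneg (by omega) (by omega)
    have e3 : ((b - a + s - 1) / s).toNat = ((b - (a+s) + s - 1) / s).toNat + 1 := by
      omega
    rw [e3, List.range_succ_eq_map]
    simp only [List.map_cons, List.map_map, Nat.cast_zero, mul_zero, add_zero]
    congr 1
    apply List.map_congr_left
    intro k _
    simp [Function.comp]
    push_cast
    ring
  · rw [if_neg h2]
    have e : (b - a + s - 1) / s = 1 := by
      have e1 : b - a + s - 1 = (b - a - 1) + 1 * s := by ring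
      rw [e1, Int.add_mul_ediv_right _ _ (by omega : s ≠ 0),
        Int.ediv_eq_zero_of_lt (by omega) (by omega)]
      ring
    rw [e]
    simp

lemma mod_multiple_add {s q d : Int} (hs : 0 < s) (h0 : 0 ≤ d) (hd : d < s) :
    PySem.Int.mod (s * q + d) s = d := by
  rw [PySem.Int.mod_eq_emod_of_pos hs]
  rw [add_comm, Int.add_mul_emod_self_left]
  exact Int.emod_eq_of_lt h0 hd

lemma join_two (jc a b : String) : PySem.Str.join jc [a, b] = a ++ jc ++ b := by
  rw [← String.toList_inj]
  simp [PySem.Str.toList_join, PySem.Chars.join_cons_cons, PySem.Chars.join_singleton]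

lemma join_cons_append (jc x y : String) (cs : List String) :
    PySem.Str.join jc ((x ++ jc ++ y) :: cs) = x ++ jc ++ PySem.Str.join jc (y :: cs) := by
  rw [← String.toList_inj]
  cases cs with
  | nil => simp [PySem.Str.toList_join, PySem.Chars.join_singleton]
  | cons z zs =>
      simp [PySem.Str.toList_join, PySem.Chars.join_cons_cons]

lemma foldl_join_eq (jc : String) : ∀ (cs : List String) (x : String),
    cs.foldl (fun a t => PySem.Str.join jc [a, t]) x = PySem.Str.join jc (x :: cs) := by
  intro cs
  induction cs with
  | nil =>
      intro x
      rw [← String.toList_inj]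
      simp [PySem.Str.toList_join, PySem.Chars.join_singleton]
  | cons y ys ih =>
      intro x
      simp only [List.foldl_cons]
      rw [join_two, ih, join_cons_append]
      rw [← String.toList_inj]
      simp [PySem.Str.toList_join, PySem.Chars.join_cons_cons]

lemma str_empty_append (w : String) : "" ++ w = w := by
  rw [← String.toList_inj]; simp

lemma join_one (jc x : String) : PySem.Str.join jc [x] = x := by
  rw [← String.toList_inj]
  simp [PySem.Str.toList_join, PySem.Chars.join_singleton]

lemma A_run (s : Int) (hs : 1 ≤ s) (jc : String) (n i0 : Int) (hq : ∃ q, i0 = s * q) :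
    ∀ (cs : List String) (d : Nat), 1 ≤ d →
      (d : Int) + cs.length ≤ s →
      i0 + d + cs.length ≤ n →
      ((d : Int) + cs.length = s ∨ i0 + d + cs.length = n) →
      ∀ (acc : List String × List (List String) × List (List Int))
      (jt : String) (ut : List String) (rel : List Int), cs ≠ [] →
    (PySem.List.enumerate cs (i0 + d)).foldl (pvAstep n s jc) (acc, (jt, ut, rel)) =
      ((acc.1 ++ [cs.foldl (fun a t => PySem.Str.join jc [a, t]) jt],
        acc.2.1 ++ [ut ++ cs],
        acc.2.2 ++ [rel ++ PySem.List.pyRange (i0 + d) (i0 + d + cs.length) 1]),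
       (cs.foldl (fun a t => PySem.Str.join jc [a, t]) jt, ut ++ cs,
        rel ++ PySem.List.pyRange (i0 + d) (i0 + d + cs.length) 1)) := by
  obtain ⟨q, rfl⟩ := hq
  intro cs
  induction cs with
  | nil => intro d _ _ _ _ acc jt ut rel hne; exact absurd rfl hne
  | cons x ys ih =>
    intro d hd hle hfit hflush acc jt ut rel _
    have hmod : PySem.Int.mod (s * q + d) s = d := by
      apply mod_multiple_add (by omega) (by omega)
      have := ys.length
      simp only [List.length_cons] at hle
      push_cast at hle
      omega
    cases ys with
    | nil =>
      simp only [List.length_cons, List.length_nil] at hflush hle hfit ⊢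
      push_cast at hflush hle hfit
      have hd0 : ((d : Int)) ≠ 0 := by omega
      have hfl : ((d : Int) = s - 1 ∨ s * q + (d : Int) = n - 1) := by omega
      rw [PySem.List.enumerate_cons, PySem.List.enumerate_nil]
      simp only [List.foldl_cons, List.foldl_nil]
      simp only [pvAstep, hmod, if_neg hd0, if_pos hfl]
      have hr : PySem.List.pyRange (s * q + ↑d) (s * q + ↑d + ((0:Nat) + 1 : Nat)) 1 = [s * q + ↑d] := by
        push_cast
        exact PySem.List.pyRange_one_singleton _
      rw [hr]
    | cons y zs =>
      simp only [List.length_cons] at hflush hle hfit ⊢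
      push_cast at hflush hle hfit
      have hd0 : ((d : Int)) ≠ 0 := by omega
      have hfl : ¬((d : Int) = s - 1 ∨ s * q + (d : Int) = n - 1) := by omega
      rw [PySem.List.enumerate_cons]
      simp only [List.foldl_cons]
      simp only [pvAstep, hmod, if_neg hd0, if_neg hfl]
      have e1 : s * q + ↑d + 1 = s * q + ((d + 1 : Nat) : Int) := by push_cast; ring
      rw [e1]
      rw [ih (d+1) (by omega) (by simp only [List.length_cons]; push_cast; omega)
        (by simp only [List.length_cons]; push_cast; omega)
        (by simp only [List.length_cons]; push_cast; omega) acc (PySem.Str.join jc [jt, x]) (ut ++ [x])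
        (rel ++ [s * q + ↑d]) (by simp)]
      have hrng : rel ++ [s * q + ↑d] ++ PySem.List.pyRange (s * q + ↑(d+1)) (s * q + ↑(d+1) + ((zs.length + 1 : Nat) : Int)) 1
          = rel ++ PySem.List.pyRange (s * q + ↑d) (s * q + ↑d + ((zs.length + 1 + 1 : Nat) : Int)) 1 := by
        rw [List.append_assoc]
        congr 1
        rw [PySem.List.pyRange_one_cons (show s * q + (d:Int) < s * q + (d:Int) + ((zs.length + 1 + 1 : Nat) : Int) by push_cast; omega)]
        simp only [List.singleton_append]
        congr 2 <;> push_cast <;> ring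
      simp only [List.foldl_cons, List.append_assoc, List.cons_append, List.nil_append] at hrng ⊢
      rw [← hrng]
      simp only [List.length_cons]

lemma A_chunk (s : Int) (hs : 1 ≤ s) (jc : String) (n i0 : Int) (hq : ∃ q, i0 = s * q)
    (c : List String) (hne : c ≠ []) (hlen : (c.length : Int) ≤ s)
    (hfit : i0 + c.length ≤ n) (hflush : (c.length : Int) = s ∨ i0 + c.length = n)
    (acc : List String × List (List String) × List (List Int))
    (carry : String × List String × List Int) :
    (PySem.List.enumerate c i0).foldl (pvAstep n s jc) (acc, carry) =
      ((acc.1 ++ [jc ++ PySem.Str.join jc c],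
        acc.2.1 ++ [c],
        acc.2.2 ++ [PySem.List.pyRange i0 (i0 + c.length) 1]),
       (jc ++ PySem.Str.join jc c, c, PySem.List.pyRange i0 (i0 + c.length) 1)) := by
  obtain ⟨q, rfl⟩ := hq
  have hmod0 : PySem.Int.mod (s * q) s = 0 := by
    have := mod_multiple_add (q := q) (d := 0) (show (0:Int) < s by omega) le_rfl (by omega)
    simpa using this
  cases c with
  | nil => exact absurd rfl hne
  | cons x cs =>
    rw [PySem.List.enumerate_cons]
    simp only [List.foldl_cons]
    cases cs with
    | nil =>
      simp only [List.length_cons, List.length_nil] at hflush hfit ⊢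
      push_cast at hflush hfit ⊢
      have hfl : ((0:Int) = s - 1 ∨ s * q = n - 1) := by omega
      rw [PySem.List.enumerate_nil]
      simp only [List.foldl_nil]
      simp only [pvAstep, hmod0]
      simp only [if_pos rfl, if_pos hfl, ite_true, eq_self_iff_true]
      rw [join_two, join_one, str_empty_append,
        (by push_cast; ring : s * q + (1:Int) = s * q + 1),
        PySem.List.pyRange_one_singleton]
      simp
    | cons y zs =>
      simp only [List.length_cons] at hflush hlen hfit ⊢
      push_cast at hflush hlen hfit ⊢
      have hfl : ¬((0:Int) = s - 1 ∨ s * q = n - 1) := by omega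
      simp only [pvAstep, hmod0]
      simp only [if_pos rfl, if_neg hfl, ite_true, eq_self_iff_true]
      have e1 : s * q + 1 = s * q + ((1 : Nat) : Int) := by push_cast; ring
      rw [e1]
      rw [A_run s hs jc n (s * q) ⟨q, rfl⟩ (y :: zs) 1 le_rfl
        (by simp only [List.length_cons]; push_cast; omega)
        (by simp only [List.length_cons]; push_cast; omega)
        (by simp only [List.length_cons]; push_cast; omega)
        acc (PySem.Str.join jc ["", x]) ([] ++ [x]) ([] ++ [s * q]) (by simp)]
      simp only [if_pos rfl, ite_true, List.nil_append, List.length_cons]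
      rw [foldl_join_eq, join_two, str_empty_append]
      have hj : PySem.Str.join jc ((jc ++ x) :: y :: zs) = jc ++ PySem.Str.join jc (x :: y :: zs) := by
        have := join_cons_append jc "" x (y :: zs)
        simpa [str_empty_append] using this
      rw [hj]
      have hrng : ([s * q] : List Int) ++ PySem.List.pyRange (s * q + ((1:Nat):Int)) (s * q + ((1:Nat):Int) + ((zs.length + 1 : Nat) : Int)) 1
          = PySem.List.pyRange (s * q) (s * q + ((zs.length + 1 + 1 : Nat) : Int)) 1 := by
        rw [PySem.List.pyRange_one_cons (show s * q < s * q + ((zs.length + 1 + 1 : Nat) : Int) by push_cast; omega)]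
        simp only [List.singleton_append]
        congr 2 <;> push_cast <;> ring
      push_cast at hrng ⊢
      rw [hrng]
      simp

def pvChunks (S : Nat) (jc : String) : Nat → Nat → List String →
    List String × List (List String) × List (List Int)
  | 0, _, _ => ([], [], [])
  | fuel+1, i0, ts =>
    match ts with
    | [] => ([], [], [])
    | _ :: _ =>
      let c := ts.take S
      let r := pvChunks S jc fuel (i0 + S) (ts.drop S)
      ((jc ++ PySem.Str.join jc c) :: r.1, c :: r.2.1,
       PySem.List.pyRange (i0 : Int) ((i0 : Int) + (c.length : Int)) 1 :: r.2.2)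

lemma pvChunks_nil (S : Nat) (jc : String) (fuel i0 : Nat) :
    pvChunks S jc fuel i0 [] = ([], [], []) := by
  cases fuel <;> rfl

lemma A_chunks (s : Int) (hs : 1 ≤ s) (jc : String) (n : Int) :
    ∀ (fuel : Nat) (ts : List String) (i0 : Nat), ts.length ≤ fuel →
      (∃ q, (i0 : Int) = s * q) → n = (i0 : Int) + ts.length →
      ∀ (acc : List String × List (List String) × List (List Int))
        (carry : String × List String × List Int),
      ∃ carry',
      (PySem.List.enumerate ts (i0 : Int)).foldl (pvAstep n s jc) (acc, carry) =
        ((acc.1 ++ (pvChunks s.toNat jc fuel i0 ts).1,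
          acc.2.1 ++ (pvChunks s.toNat jc fuel i0 ts).2.1,
          acc.2.2 ++ (pvChunks s.toNat jc fuel i0 ts).2.2), carry') := by
  intro fuel
  induction fuel with
  | zero =>
    intro ts i0 hf _ _ acc carry
    have : ts = [] := by
      cases ts with
      | nil => rfl
      | cons a b => simp at hf
    subst this
    exact ⟨carry, by simp [pvChunks, PySem.List.enumerate_nil]⟩
  | succ fuel ih =>
    intro ts i0 hf hq hn acc carry
    cases ts with
    | nil => exact ⟨carry, by simp [pvChunks_nil, PySem.List.enumerate_nil]⟩
    | cons t0 ts' =>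
      have hS1 : 1 ≤ s.toNat := by omega
      have hScast : ((s.toNat : Nat) : Int) = s := by omega
      set ts := t0 :: ts' with hts
      set c := ts.take s.toNat with hc
      set rest := ts.drop s.toNat with hrest
      have hsplit : ts = c ++ rest := (List.take_append_drop _ _).symm
      have hcne : c ≠ [] := by
        rw [hc, hts]
        obtain ⟨k, hk⟩ : ∃ k, s.toNat = k + 1 := ⟨s.toNat - 1, by omega⟩
        rw [hk]
        simp
      have hclen : (c.length : Int) ≤ s := by
        have : c.length ≤ s.toNat := by rw [hc]; exact (List.length_take_le _ _)
        omega
      have hclen2 : c.length ≤ ts.length := by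
        rw [hc]; exact (List.length_take_le' _ _)
      have hcfit : (i0 : Int) + c.length ≤ n := by
        rw [hn]; push_cast; omega
      have hcflush : ((c.length : Int) = s ∨ (i0 : Int) + c.length = n) := by
        by_cases hle : s.toNat ≤ ts.length
        · left
          have : c.length = s.toNat := by rw [hc]; simp [List.length_take]; omega
          omega
        · right
          have : c.length = ts.length := by rw [hc]; simp [List.length_take]; omega
          omega
      have hunfold : pvChunks s.toNat jc (fuel+1) i0 ts =
          ((jc ++ PySem.Str.join jc c) :: (pvChunks s.toNat jc fuel (i0 + s.toNat) rest).1,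
           c :: (pvChunks s.toNat jc fuel (i0 + s.toNat) rest).2.1,
           PySem.List.pyRange (i0 : Int) ((i0 : Int) + (c.length : Int)) 1 :: (pvChunks s.toNat jc fuel (i0 + s.toNat) rest).2.2) := by
        rw [hts]; rfl
      rw [hunfold, hsplit, PySem.List.enumerate_append, List.foldl_append]
      rw [A_chunk s hs jc n (i0 : Int) hq c hcne hclen hcfit hcflush acc carry]
      by_cases hrne : rest = []
      · rw [hrne, PySem.List.enumerate_nil]
        simp only [List.foldl_nil]
        refine ⟨(jc ++ PySem.Str.join jc c, c, PySem.List.pyRange (i0 : Int) ((i0 : Int) + (c.length : Int)) 1), ?_⟩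
        simp [pvChunks_nil]
      · have hcfull : c.length = s.toNat := by
          have : s.toNat ≤ ts.length := by
            by_contra hlt
            have : rest = [] := by rw [hrest]; apply List.drop_eq_nil_of_le; omega
            exact hrne this
          rw [hc]; simp [List.length_take]; omega
        have hrlen : rest.length ≤ fuel := by
          have : rest.length = ts.length - s.toNat := by rw [hrest]; simp
          omega
        have hq' : ∃ q, ((i0 + s.toNat : Nat) : Int) = s * q := by
          obtain ⟨q, hqq⟩ := hq
          exact ⟨q + 1, by push_cast; rw [hqq, hScast]; ring⟩
        have hn' : n = ((i0 + s.toNat : Nat) : Int) + rest.length := by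
          have : ts.length = c.length + rest.length := by
            conv_lhs => rw [hsplit]
            simp
          push_cast
          push_cast at hn
          omega
        have estart : (i0 : Int) + (c.length : Int) = ((i0 + s.toNat : Nat) : Int) := by
          push_cast; omega
        obtain ⟨carry', hIH⟩ := ih rest (i0 + s.toNat) hrlen hq' hn'
          (acc.1 ++ [jc ++ PySem.Str.join jc c], acc.2.1 ++ [c],
           acc.2.2 ++ [PySem.List.pyRange (i0 : Int) ((i0 : Int) + (c.length : Int)) 1])
          (jc ++ PySem.Str.join jc c, c, PySem.List.pyRange (i0 : Int) ((i0 : Int) + (c.length : Int)) 1)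
        rw [← estart] at hIH
        refine ⟨carry', ?_⟩
        rw [hIH]
        simp

lemma B_chunks (s : Int) (hs : 1 ≤ s) (jc : String) (texts : List String) :
    ∀ (fuel : Nat) (i0 : Nat), texts.length - i0 ≤ fuel →
      ∀ (acc : List String × List (List String) × List (List Int)),
      (PySem.List.pyRange (i0 : Int) (texts.length : Int) s).foldl (pvBstep s jc texts) acc =
        (acc.1 ++ (pvChunks s.toNat jc fuel i0 (texts.drop i0)).1,
         acc.2.1 ++ (pvChunks s.toNat jc fuel i0 (texts.drop i0)).2.1,
         acc.2.2 ++ (pvChunks s.toNat jc fuel i0 (texts.drop i0)).2.2) := by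
  intro fuel
  induction fuel with
  | zero =>
    intro i0 hf acc
    have hge : texts.length ≤ i0 := by omega
    rw [pyRange_pos_nil (by omega) (by exact_mod_cast hge)]
    rw [List.drop_eq_nil_of_le hge, pvChunks_nil]
    simp
  | succ fuel ih =>
    intro i0 hf acc
    by_cases hlt : i0 < texts.length
    · rw [pyRange_pos_cons (by omega) (by exact_mod_cast hlt)]
      simp only [List.foldl_cons]
      have hchunk : PySem.List.slice texts (some (i0 : Int)) (some ((i0 : Int) + s)) =
          (texts.drop i0).take s.toNat := by
        rw [PySem.List.slice_toNat texts (by omega) (by omega)]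
        congr 1
        omega
      have hts : texts.drop i0 ≠ [] := by
        intro h
        have := List.drop_eq_nil_iff.mp h
        omega
      have hunfold : pvChunks s.toNat jc (fuel+1) i0 (texts.drop i0) =
          ((jc ++ PySem.Str.join jc ((texts.drop i0).take s.toNat)) :: (pvChunks s.toNat jc fuel (i0 + s.toNat) ((texts.drop i0).drop s.toNat)).1,
           (texts.drop i0).take s.toNat :: (pvChunks s.toNat jc fuel (i0 + s.toNat) ((texts.drop i0).drop s.toNat)).2.1,
           PySem.List.pyRange (i0 : Int) ((i0 : Int) + (((texts.drop i0).take s.toNat).length : Int)) 1 :: (pvChunks s.toNat jc fuel (i0 + s.toNat) ((texts.drop i0).drop s.toNat)).2.2) := by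
        cases h : texts.drop i0 with
        | nil => exact absurd h hts
        | cons a b => rfl
      have hdd : (texts.drop i0).drop s.toNat = texts.drop (i0 + s.toNat) := by
        rw [List.drop_drop]

      have estart : (i0 : Int) + s = ((i0 + s.toNat : Nat) : Int) := by push_cast; omega
      rw [hunfold, hdd]
      simp only [pvBstep, hchunk]
      rw [estart]
      rw [ih (i0 + s.toNat) (by omega)]
      simp
    · have hge : texts.length ≤ i0 := by omega
      rw [pyRange_pos_nil (by omega) (by exact_mod_cast hge)]
      rw [List.drop_eq_nil_of_le hge, pvChunks_nil]
      simp

lemma join_summaries_eq_alt (texts : List String) (s : Int) (jc : String)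
    (hpre : 1 ≤ s ∨ texts = []) :
    join_summaries texts s jc = join_summaries_alt texts s jc := by
  by_cases hnil : texts = []
  · subst hnil
    simp [join_summaries, join_summaries_alt, PySem.List.enumerate_nil]
  · have hs : 1 ≤ s := hpre.resolve_right hnil
    unfold join_summaries join_summaries_alt
    rw [if_neg hnil]
    obtain ⟨carry', hA⟩ := A_chunks s hs jc (texts.length : Int) texts.length texts 0 le_rfl
      ⟨0, by simp⟩ (by simp) ([], [], []) ("", [], [])
    have hB := B_chunks s hs jc texts texts.length 0 (by omega) ([], [], [])
    simp only [Nat.cast_zero] at hA hB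
    rw [hA, hB]
    simp

-- ===== VERDICT (by name: the statement is the Claim_ definition above) =====
theorem join_summaries_spec : Claim_equal_join_summaries := by
  intro texts sum_ratio join_character _hdom hpre
  unfold Spec_join_summaries
  exact join_summaries_eq_alt texts sum_ratio join_character hpre
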